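-- pv_equiv track=rewrite | github.com/jraymondli/usaco-1 | 2017/March/February 2017 Prob 1/2017_March_1_lostcow.py | follow_through
-- ===== SOURCE A (Python) =====
-- def follow_through(places):
--     person = places[0]
--     cow = places[1]
--     change_factor = 1
--     dist = 0
--     while True:
--         moved = 0
--         for move in range(abs(places[0]-person)+abs(change_factor)):
--             if change_factor >= 0:
--                 person += 1
--             else:
--                 person -= 1
--             moved += 1
--             dist += 1
--             if person == cow:
--                 return dist
--         change_factor *= -2
-- ===== SOURCE B (Python) =====
-- def follow_through(places):
--     x = places[0]
--     cow = places[1]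
--     d = cow - x
--     a = 0            # person's offset from x at the start of the phase
--     cf = 1
--     dist = 0
--     while True:
--         sigma = 1 if cf > 0 else -1
--         length = abs(a) + abs(cf)
--         steps = sigma * (d - a)
--         if 1 <= steps <= length:
--             return dist + steps
--         dist += length
--         a += sigma * length
--         cf *= -2
-- ===== Notes on version B (the rewrite author's own statement) =====
-- stated objective: faster
-- what changed: Instead of simulating every unit step of the back-and-forth search, B processes each doubling phase in O(1) arithmetic, checking whether the cow's offset lies in the segment swept by that phase; O(log D) phases instead of O(D) unit steps.
import Mathlib
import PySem

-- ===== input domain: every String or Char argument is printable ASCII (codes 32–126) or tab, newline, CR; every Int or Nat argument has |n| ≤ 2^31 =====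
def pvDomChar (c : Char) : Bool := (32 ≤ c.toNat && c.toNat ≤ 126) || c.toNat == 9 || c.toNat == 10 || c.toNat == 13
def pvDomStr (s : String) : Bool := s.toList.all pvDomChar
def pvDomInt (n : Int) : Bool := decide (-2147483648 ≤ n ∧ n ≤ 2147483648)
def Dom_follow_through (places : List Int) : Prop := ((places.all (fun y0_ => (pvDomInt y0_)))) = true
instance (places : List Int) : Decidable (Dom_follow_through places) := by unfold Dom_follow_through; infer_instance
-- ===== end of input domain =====

-- B replaces A's unit-step simulation of the lost-cow search with O(1) arithmetic per
-- doubling phase (objective: faster, asymptotically O(log D) phases vs O(D) unit steps).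
-- Both loops are ported with a fuel counter of 100 (pure totalisation guard: inside the
-- stated integer domain far fewer than 100 phases ever run, and both ports exhaust the
-- fuel in lock-step, so the equivalence below holds for all inputs with length ≥ 2).

-- ===== PORT A =====
-- inner `for move in range(n)` loop: returns (some dist) when the cow is reached,
-- otherwise (none, final person, final moved, final dist)
def ftInner (cow : Int) (cfNonneg : Bool) : Nat → Int → Int → Int → (Option Int × Int × Int × Int)
  | 0, person, moved, dist => (none, person, moved, dist)
  | n+1, person, moved, dist =>
    let person' := if cfNonneg then person + 1 else person - 1
    let moved' := moved + 1
    let dist' := dist + 1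
    if person' = cow then (some dist', person', moved', dist')
    else ftInner cow cfNonneg n person' moved' dist'

-- outer `while True` loop, fueled
def ftOuter (x cow : Int) : Nat → Int → Int → Int → Int
  | 0, _, _, _ => 0
  | f+1, person, cf, dist =>
    match ftInner cow (decide (0 ≤ cf)) ((x - person).natAbs + cf.natAbs) person 0 dist with
    | (some d, _, _, _) => d
    | (none, person', _, dist') => ftOuter x cow f person' (cf * -2) dist'

def follow_through (places : List Int) : Int :=
  match PySem.List.pyGet? places 0, PySem.List.pyGet? places 1 with
  | some person, some cow => ftOuter person cow 100 person 1 0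
  | _, _ => 0

-- ===== PORT B =====
-- one O(1) check per phase: a = person's offset from the start x, d = cow's offset
def ftPhases (d : Int) (fuel : Nat) (a cf dist : Int) : Int :=
  match fuel with
  | 0 => 0
  | f+1 =>
    let sigma : Int := if 0 < cf then 1 else -1
    let length : Int := (a.natAbs : Int) + (cf.natAbs : Int)
    let steps := sigma * (d - a)
    if 1 ≤ steps ∧ steps ≤ length then dist + steps
    else ftPhases d f (a + sigma * length) (cf * -2) (dist + length)

def follow_through_alt (places : List Int) : Int :=
  match PySem.List.pyGet? places 0 with
  | none => 0
  | some x =>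
    match PySem.List.pyGet? places 1 with
    | none => 0
    | some cow => ftPhases (cow - x) 100 0 1 0

-- ===== PRECONDITION & SPEC =====
-- Pre_ excludes lists of length < 2, on which A raises IndexError (places[1]).
def Pre_follow_through (places : List Int) : Prop := 2 ≤ places.length
instance (places : List Int) : Decidable (Pre_follow_through places) := by unfold Pre_follow_through; infer_instance
def pvWitness_follow_through : List Int := [0, 3]
def Spec_follow_through (places : List Int) (out : Int) : Prop := out = follow_through_alt places
instance (places : List Int) (out : Int) : Decidable (Spec_follow_through places out) := by unfold Spec_follow_through; infer_instance

-- ===== CLAIM (what is proved, stated in full; the proofs are below) =====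
def Claim_equal_follow_through : Prop := ∀ (places : List Int), Dom_follow_through places → Pre_follow_through places → Spec_follow_through places (follow_through places)

-- ===== LEMMAS AND PROOFS =====

-- The inner unit-step loop, characterised arithmetically.  σ = +1 or -1 per `cfNonneg`;
-- writing t = σ*(cow - person): a hit happens iff 1 ≤ t ≤ n, at distance dist + t;
-- otherwise the loop ends with person moved by σ*n and dist increased by n.
theorem ftInner_eq (cow : Int) (b : Bool) (n : Nat) (person moved dist : Int) :
    ftInner cow b n person moved dist =
      (let σ : Int := if b then 1 else -1
       let t := σ * (cow - person)
       if 1 ≤ t ∧ t ≤ (n : Int) then (some (dist + t), person + σ * t, moved + t, dist + t)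
       else (none, person + σ * n, moved + n, dist + n)) := by
  cases b with
  | true =>
    simp only [if_true]
    induction n generalizing person moved dist with
    | zero =>
      rw [ftInner, if_neg (by push_cast; omega)]
      refine Prod.ext ?_ (Prod.ext ?_ (Prod.ext ?_ ?_)) <;>
        first
        | rfl
        | (simp only [Option.some.injEq]; push_cast; omega)
        | (push_cast; omega)
    | succ n ih =>
      rw [ftInner]
      simp only [if_true]
      by_cases hhit : person + 1 = cow
      · rw [if_pos hhit, if_pos (by push_cast; omega)]
        refine Prod.ext ?_ (Prod.ext ?_ (Prod.ext ?_ ?_)) <;>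
          first
          | rfl
          | (simp only [Option.some.injEq]; push_cast; omega)
          | (push_cast; omega)
      · rw [if_neg hhit, ih]
        by_cases hc : 1 ≤ cow - person ∧ cow - person ≤ ((n : Int) + 1)
        · rw [if_pos (by push_cast; omega), if_pos (by push_cast; omega)]
          refine Prod.ext ?_ (Prod.ext ?_ (Prod.ext ?_ ?_)) <;>
            first
            | rfl
            | (simp only [Option.some.injEq]; push_cast; omega)
            | (push_cast; omega)
        · rw [if_neg (by push_cast at hc ⊢; omega), if_neg (by push_cast at hc ⊢; omega)]
          refine Prod.ext ?_ (Prod.ext ?_ (Prod.ext ?_ ?_)) <;>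
            first
            | rfl
            | (simp only [Option.some.injEq]; push_cast; omega)
            | (push_cast; omega)
  | false =>
    simp only [Bool.false_eq_true, if_false]
    induction n generalizing person moved dist with
    | zero =>
      rw [ftInner, if_neg (by push_cast; omega)]
      refine Prod.ext ?_ (Prod.ext ?_ (Prod.ext ?_ ?_)) <;>
        first
        | rfl
        | (simp only [Option.some.injEq]; push_cast; omega)
        | (push_cast; omega)
    | succ n ih =>
      rw [ftInner]
      simp only [Bool.false_eq_true, if_false]
      by_cases hhit : person - 1 = cow
      · rw [if_pos hhit, if_pos (by push_cast; omega)]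
        refine Prod.ext ?_ (Prod.ext ?_ (Prod.ext ?_ ?_)) <;>
          first
          | rfl
          | (simp only [Option.some.injEq]; push_cast; omega)
          | (push_cast; omega)
      · rw [if_neg hhit, ih]
        by_cases hc : 1 ≤ person - cow ∧ person - cow ≤ ((n : Int) + 1)
        · rw [if_pos (by push_cast; omega), if_pos (by push_cast; omega)]
          refine Prod.ext ?_ (Prod.ext ?_ (Prod.ext ?_ ?_)) <;>
            first
            | rfl
            | (simp only [Option.some.injEq]; push_cast; omega)
            | (push_cast; omega)
        · rw [if_neg (by push_cast at hc ⊢; omega), if_neg (by push_cast at hc ⊢; omega)]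
          refine Prod.ext ?_ (Prod.ext ?_ (Prod.ext ?_ ?_)) <;>
            first
            | rfl
            | (simp only [Option.some.injEq]; push_cast; omega)
            | (push_cast; omega)

-- Lock-step correspondence of the two fueled loops: A's state person relates to B's
-- offset a by person = x + a, and cf ≠ 0 keeps the two sign tests (0 ≤ cf vs 0 < cf) equal.
theorem outer_eq_phases (x cow : Int) (f : Nat) :
    ∀ (a cf dist : Int), cf ≠ 0 →
      ftOuter x cow f (x + a) cf dist = ftPhases (cow - x) f a cf dist := by
  induction f with
  | zero => intro a cf dist _; simp [ftOuter, ftPhases]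
  | succ f ih =>
    intro a cf dist hcf
    have hsign : decide (0 ≤ cf) = decide (0 < cf) := by
      rcases lt_or_gt_of_ne hcf with h | h <;> simp [h, not_le.mpr h, le_of_lt h]
    simp only [ftOuter, ftPhases, hsign]
    rw [ftInner_eq]
    simp only [show x - (x + a) = -a from by ring, Int.natAbs_neg]
    set σ : Int := if decide (0 < cf) = true then (1:Int) else -1 with hσdef
    have hσ' : (if (0:Int) < cf then (1:Int) else -1) = σ := by
      by_cases h : (0:Int) < cf <;> simp [hσdef, h]
    have ht : σ * (cow - (x + a)) = σ * ((cow - x) - a) := by ring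
    simp only [ht, hσ']
    by_cases hc : 1 ≤ σ * ((cow - x) - a) ∧ σ * ((cow - x) - a) ≤ ((a.natAbs + cf.natAbs : Nat) : Int)
    · rw [if_pos hc, if_pos (by push_cast at hc ⊢; omega)]
      try rfl
    · rw [if_neg hc, if_neg (by push_cast at hc ⊢; omega)]
      have hstep : x + a + σ * ((a.natAbs + cf.natAbs : Nat) : Int)
            = x + (a + σ * ((a.natAbs : Int) + (cf.natAbs : Int))) := by
        push_cast; ring
      rw [hstep]
      exact ih (a + σ * ((a.natAbs : Int) + (cf.natAbs : Int))) (cf * -2)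
        (dist + ((a.natAbs + cf.natAbs : Nat) : Int)) (by intro h; omega) ▸ (by push_cast; ring_nf)

-- ===== VERDICT (by name: the statement is the Claim_ definition above) =====
theorem follow_through_spec : Claim_equal_follow_through := by
  intro places _ hpre
  unfold Spec_follow_through follow_through follow_through_alt
  match places, hpre with
  | x :: cow :: rest, _ =>
    have h0 : PySem.List.pyGet? (x :: cow :: rest) 0 = some x := PySem.List.pyGet?_zero_cons ..
    have h1 : PySem.List.pyGet? (x :: cow :: rest) 1 = some cow := by
      rw [show (1:Int) = ((0:Nat):Int) + 1 from by norm_num, PySem.List.pyGet?_cons_succ]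
      simpa using PySem.List.pyGet?_zero_cons (x := cow) (xs := rest)
    rw [h0, h1]
    simpa using outer_eq_phases x cow 100 0 1 0 (by norm_num)
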